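-- pv_equiv track=rewrite | github.com/JoaoVictor-C/ArenaRanking | Python-old/services/mmr_processor.py | _obter_novas_partidas
-- ===== SOURCE A (Python) =====
-- def _obter_novas_partidas(partidas_ids, ultimo_match_id_processado):
--     """Função auxiliar para obter apenas as novas partidas."""
--     if not ultimo_match_id_processado:
--         return partidas_ids  # Processar todas se não houver registro
--
--     novas_partidas_ids = []
--     for match_id in partidas_ids:
--         if match_id == ultimo_match_id_processado:
--             break  # Já processou até aqui
--         novas_partidas_ids.append(match_id)
--
--     return novas_partidas_ids
-- ===== SOURCE B (Python) =====
-- def _obter_novas_partidas(partidas_ids, ultimo_match_id_processado):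
--     """Find the cutoff with .index and slice, instead of append-while-scanning."""
--     if not ultimo_match_id_processado:
--         return partidas_ids
--     try:
--         idx = partidas_ids.index(ultimo_match_id_processado)
--         return partidas_ids[:idx]
--     except ValueError:
--         return partidas_ids[:]
-- ===== Notes on version B (the rewrite author's own statement) =====
-- stated objective: idiomatic
-- what changed: Replaces the append-and-break accumulation loop with locate-the-boundary via list.index inside try/except and a prefix slice.
import Mathlib
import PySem

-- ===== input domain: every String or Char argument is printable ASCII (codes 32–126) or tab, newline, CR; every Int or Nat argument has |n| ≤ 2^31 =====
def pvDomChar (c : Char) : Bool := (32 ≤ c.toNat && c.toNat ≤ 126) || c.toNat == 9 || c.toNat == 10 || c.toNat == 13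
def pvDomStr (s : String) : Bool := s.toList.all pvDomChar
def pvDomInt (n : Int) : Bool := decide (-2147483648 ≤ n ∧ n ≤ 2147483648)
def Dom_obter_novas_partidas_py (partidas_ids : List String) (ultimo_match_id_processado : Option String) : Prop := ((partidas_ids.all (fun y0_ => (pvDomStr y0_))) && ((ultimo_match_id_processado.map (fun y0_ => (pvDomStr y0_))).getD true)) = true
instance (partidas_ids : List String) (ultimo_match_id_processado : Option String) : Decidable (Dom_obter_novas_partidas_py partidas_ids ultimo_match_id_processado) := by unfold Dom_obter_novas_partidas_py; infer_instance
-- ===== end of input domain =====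

-- ===== PORT A =====
-- loop with break -> structural recursion accumulating the prefix
def pvLoopA : List String → String → List String
  | [], _ => []
  | x :: xs, u => if x == u then [] else x :: pvLoopA xs u

def obter_novas_partidas_py (partidas_ids : List String) (ultimo_match_id_processado : Option String) : List String :=
  match ultimo_match_id_processado with
  | none => partidas_ids
  | some u => if u == "" then partidas_ids else pvLoopA partidas_ids u

-- ===== PORT B =====
-- B: find cutoff with list.index, slice the prefix; on ValueError return a full copy
def obter_novas_partidas_py_alt (partidas_ids : List String) (ultimo_match_id_processado : Option String) : List String :=
  match ultimo_match_id_processado with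
  | none => partidas_ids
  | some u =>
    if u == "" then partidas_ids else
    match PySem.List.index? partidas_ids u with
    | some idx => PySem.List.slice partidas_ids none (some (idx : Int))
    | none => PySem.List.slice partidas_ids none none

-- ===== PRECONDITION & SPEC =====
def Spec_obter_novas_partidas_py (partidas_ids : List String) (ultimo_match_id_processado : Option String) (out : List String) : Prop := out = obter_novas_partidas_py_alt partidas_ids ultimo_match_id_processado
instance (partidas_ids : List String) (ultimo_match_id_processado : Option String) (out : List String) : Decidable (Spec_obter_novas_partidas_py partidas_ids ultimo_match_id_processado out) := by unfold Spec_obter_novas_partidas_py; infer_instance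

-- ===== CLAIM (what is proved, stated in full; the proofs are below) =====
def Claim_equal_obter_novas_partidas_py : Prop := ∀ (partidas_ids : List String) (ultimo_match_id_processado : Option String), Dom_obter_novas_partidas_py partidas_ids ultimo_match_id_processado → Spec_obter_novas_partidas_py partidas_ids ultimo_match_id_processado (obter_novas_partidas_py partidas_ids ultimo_match_id_processado)

-- ===== LEMMAS AND PROOFS =====

-- ===== VERDICT (by name: the statement is the Claim_ definition above) =====
lemma pvLoopA_eq (xs : List String) (u : String) :
    pvLoopA xs u = match PySem.List.index? xs u with
      | some i => xs.take i
      | none => xs := by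
  induction xs with
  | nil => simp [pvLoopA, PySem.List.index?]
  | cons x xs ih =>
    by_cases h : x = u
    · subst h
      rw [PySem.List.index?_cons_self]
      simp [pvLoopA]
    · rw [PySem.List.index?_cons_of_ne xs h]
      simp only [pvLoopA, beq_iff_eq, if_neg h, ih]
      cases PySem.List.index? xs u <;> simp

theorem obter_novas_partidas_py_spec : Claim_equal_obter_novas_partidas_py := by
  intro xs u _
  unfold Spec_obter_novas_partidas_py obter_novas_partidas_py obter_novas_partidas_py_alt
  cases u with
  | none => rfl
  | some u =>
    by_cases hu : u = ""
    · simp [hu]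
    · simp only [beq_iff_eq, if_neg hu, pvLoopA_eq]
      cases h : PySem.List.index? xs u with
      | none => simp [PySem.List.slice_none_none]
      | some i =>
        have := PySem.List.slice_to_natCast xs i
        simp [this]
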